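-- pv_equiv track=rewrite | github.com/NetLSS/algorithm | Greedy/python/2021-08-28-TEST-주식사고팔기.py | solution
-- ===== SOURCE A (Python) =====
-- def solution(prices: list):
--     answer = 0
--
--     while True:
--         if len(prices) == 0:
--             break
--         minPrice = min(prices)
--         minIndex = prices.index(minPrice)
--         if(minIndex == len(prices)):
--             break
--         minRightList = prices[minIndex+1:]
--         if(len(minRightList) == 0):
--             break
--         maxPrice = max(minRightList)
--         maxIndex = prices.index(maxPrice)
--
--         answer += maxPrice - minPrice
--
--         prices.remove(maxPrice)
--         prices.remove(minPrice)
--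
--     return answer
-- ===== SOURCE B (Python) =====
-- # B: O(n log n) re-implementation. Persistent interval tree (min/max per node) replaces
-- # A's repeated min/max/index/remove scans; per-value index queues give first-occurrence
-- # removals in O(1). Returns A's exact value; note A empties its argument list in place,
-- # B does not mutate it (return-value equivalence only).
--
-- INF = 1 << 62
--
--
-- def _build(vals, s, e):
--     if e - s == 1:
--         v = vals[s]
--         return (v, v)
--     mid = (s + e) // 2
--     l = _build(vals, s, mid)
--     r = _build(vals, mid, e)
--     return (min(l[0], r[0]), max(l[1], r[1]), l, r)
--
--
-- def _kill(t, s, e, i):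
--     if e - s == 1:
--         return (INF, -INF)
--     mid = (s + e) // 2
--     if i < mid:
--         l = _kill(t[2], s, mid, i)
--         r = t[3]
--     else:
--         l = t[2]
--         r = _kill(t[3], mid, e, i)
--     return (min(l[0], r[0]), max(l[1], r[1]), l, r)
--
--
-- def _max_from(t, s, e, lo):
--     # max of alive values at indices >= lo within [s, e)
--     if lo <= s:
--         return t[1]
--     if lo >= e:
--         return -INF
--     mid = (s + e) // 2
--     return max(_max_from(t[2], s, mid, lo), _max_from(t[3], mid, e, lo))
--
--
-- def solution(prices: list):
--     n = len(prices)
--     if n == 0: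
--         return 0
--     pos = {}   # value -> list of its indices, ascending
--     for i in range(n):
--         pos.setdefault(prices[i], []).append(i)
--     head = {v: 0 for v in pos}   # value -> cursor of first still-alive index
--     t = _build(prices, 0, n)
--     alive = n
--     answer = 0
--     while alive > 0:
--         m = t[0]                      # smallest alive value
--         p = pos[m][head[m]]           # its first (leftmost) alive index
--         M = _max_from(t, 0, n, p + 1)  # largest alive value right of p
--         if M == -INF:
--             break
--         answer += M - m
--         j = pos[M][head[M]]           # first occurrence of M: the one A removes
--         head[M] += 1
--         t = _kill(t, 0, n, j)
--         q = pos[m][head[m]]           # first remaining occurrence of m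
--         head[m] += 1
--         t = _kill(t, 0, n, q)
--         alive -= 2
--     return answer
-- ===== Notes on version B (the rewrite author's own statement) =====
-- stated objective: faster
-- what changed: Replaces A's per-round full scans (min, index, slice, max, two remove passes) by a persistent interval tree holding the alive min/max per segment plus per-value ascending index queues with head cursors, so each round costs O(log n); A's in-place emptying of the input list is not reproduced (return value only).
import Mathlib
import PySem

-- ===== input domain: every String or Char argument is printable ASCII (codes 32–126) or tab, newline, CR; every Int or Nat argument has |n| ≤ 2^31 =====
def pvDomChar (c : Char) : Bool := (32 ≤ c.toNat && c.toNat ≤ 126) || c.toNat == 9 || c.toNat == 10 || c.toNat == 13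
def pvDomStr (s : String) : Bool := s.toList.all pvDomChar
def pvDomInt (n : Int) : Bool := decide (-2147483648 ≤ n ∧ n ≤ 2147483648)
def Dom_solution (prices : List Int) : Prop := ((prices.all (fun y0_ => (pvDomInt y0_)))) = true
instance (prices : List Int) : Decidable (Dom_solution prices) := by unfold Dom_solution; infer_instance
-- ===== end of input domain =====

-- ===== PORT A =====
-- while True loop of A; fuel = len+1 at the call site always suffices (each
-- iteration removes two elements); 'none' fallbacks are unreachable totality guards.
def pyALoop : Nat → List Int → Int → Int
  | 0, _, answer => answer
  | fuel+1, prices, answer =>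
    if prices.length = 0 then answer
    else
      match PySem.List.min? prices (fun x => x) with
      | none => answer
      | some minPrice =>
        match PySem.List.index? prices minPrice with
        | none => answer
        | some minIndex =>
          if (minIndex : Int) = (prices.length : Int) then answer
          else
            let minRightList := PySem.List.slice prices (some ((minIndex : Int) + 1)) none
            if minRightList.length = 0 then answer
            else
              match PySem.List.max? minRightList (fun x => x) with
              | none => answer
              | some maxPrice =>
                match PySem.List.index? prices maxPrice with
                | none => answer
                | some _maxIndex =>
                  let answer := answer + (maxPrice - minPrice)
                  match PySem.List.remove? prices maxPrice with
                  | none => answer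
                  | some prices1 =>
                    match PySem.List.remove? prices1 minPrice with
                    | none => answer
                    | some prices2 => pyALoop fuel prices2 answer

def solution (prices : List Int) : Int := pyALoop (prices.length + 1) prices 0

-- ===== PORT B =====
-- B: persistent interval tree (alive min/max per segment) + per-value ascending
-- index lists with head cursors; return-value equivalence (A empties its argument
-- in place, B does not).
def pvINF : Int := 4611686018427387904

inductive SegT where
  | leaf (mn mx : Int)
  | node (mn mx : Int) (l r : SegT)
deriving Repr, DecidableEq

def SegT.mn : SegT → Int
  | SegT.leaf mn _ => mn
  | SegT.node mn _ _ _ => mn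

def SegT.mx : SegT → Int
  | SegT.leaf _ mx => mx
  | SegT.node _ mx _ _ => mx

theorem pvMidBounds (s e : Int) (h : ¬ e - s ≤ 1) :
    s + 1 ≤ PySem.Int.floordiv (s + e) 2 ∧ PySem.Int.floordiv (s + e) 2 ≤ e - 1 := by
  have h2 := PySem.Int.floordiv_two_mid_bounds (lo := s + 1) (hi := e - 1) (by omega)
  have he : s + 1 + (e - 1) = s + e := by ring
  rw [he] at h2
  omega

def bBuild (vals : List Int) (s e : Int) : SegT :=
  if h : e - s ≤ 1 then  -- Python: e - s == 1 (build is never called with e ≤ s)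
    SegT.leaf (PySem.List.pyGetD vals s 0) (PySem.List.pyGetD vals s 0)
  else
    let mid := PySem.Int.floordiv (s + e) 2
    let l := bBuild vals s mid
    let r := bBuild vals mid e
    SegT.node (min l.mn r.mn) (max l.mx r.mx) l r
termination_by (e - s).toNat
decreasing_by
  · have := pvMidBounds s e h; omega
  · have := pvMidBounds s e h; omega

def bKill : SegT → Int → Int → Int → SegT
  | SegT.leaf _ _, _, _, _ => SegT.leaf pvINF (-pvINF)
  | SegT.node _ _ l r, s, e, i =>
    let mid := PySem.Int.floordiv (s + e) 2
    if i < mid then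
      let l' := bKill l s mid i
      SegT.node (min l'.mn r.mn) (max l'.mx r.mx) l' r
    else
      let r' := bKill r mid e i
      SegT.node (min l.mn r'.mn) (max l.mx r'.mx) l r'

def bMaxFrom : SegT → Int → Int → Int → Int
  | SegT.leaf _ mx, s, _, lo => if lo ≤ s then mx else -pvINF  -- leaf has e = s+1: lo ≥ e ↔ ¬ lo ≤ s
  | SegT.node _ mx l r, s, e, lo =>
    if lo ≤ s then mx
    else if e ≤ lo then -pvINF
    else
      let mid := PySem.Int.floordiv (s + e) 2
      max (bMaxFrom l s mid lo) (bMaxFrom r mid e lo)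

def bLoop : Nat → SegT → PySem.Dict Int (List Int) → PySem.Dict Int Int → Int → Int → Int → Int
  | 0, _, _, _, _, _, answer => answer
  | fuel+1, t, pos, head, n, alive, answer =>
    if alive ≤ 0 then answer
    else
      let m := t.mn
      let p := PySem.List.pyGetD (pos.getD m []) (head.getD m 0) 0
      let M := bMaxFrom t 0 n (p + 1)
      if M = -pvINF then answer
      else
        let answer' := answer + (M - m)
        let j := PySem.List.pyGetD (pos.getD M []) (head.getD M 0) 0
        let head1 := head.insert M (head.getD M 0 + 1)
        let t1 := bKill t 0 n j
        let q := PySem.List.pyGetD (pos.getD m []) (head1.getD m 0) 0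
        let head2 := head1.insert m (head1.getD m 0 + 1)
        let t2 := bKill t1 0 n q
        bLoop fuel t2 pos head2 n (alive - 2) answer'

def solution_alt (prices : List Int) : Int :=
  let n : Int := (prices.length : Int)
  if n = 0 then 0
  else
    let pos := (PySem.List.pyRange 0 n 1).foldl
      (fun d i => d.modify (PySem.List.pyGetD prices i 0) [] (· ++ [i])) PySem.Dict.empty
    let head := pos.keys.foldl (fun h v => h.insert v 0) PySem.Dict.empty
    let t := bBuild prices 0 n
    bLoop (prices.length + 1) t pos head n n 0

-- ===== PRECONDITION & SPEC =====
def Spec_solution (prices : List Int) (out : Int) : Prop := out = solution_alt prices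
instance (prices : List Int) (out : Int) : Decidable (Spec_solution prices out) := by unfold Spec_solution; infer_instance

-- ===== CLAIM (what is proved, stated in full; the proofs are below) =====
def Claim_equal_solution : Prop := ∀ (prices : List Int), Dom_solution prices → Spec_solution prices (solution prices)

-- ===== LEMMAS AND PROOFS =====

def pvVal (a : List Int) (i : Int) : Int := PySem.List.pyGetD a i 0

def pvMaskMin (val : Int → Int) (al : Int → Bool) (i : Int) : Int :=
  if al i then val i else pvINF

def pvMaskMax (val : Int → Int) (al : Int → Bool) (i : Int) : Int :=
  if al i then val i else -pvINF

def pvMinFold (val : Int → Int) (al : Int → Bool) (s e : Int) : Int :=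
  ((PySem.List.pyRange s e 1).map (pvMaskMin val al)).foldl min pvINF

def pvMaxFold (val : Int → Int) (al : Int → Bool) (s e : Int) : Int :=
  ((PySem.List.pyRange s e 1).map (pvMaskMax val al)).foldl max (-pvINF)

def pvGood (val : Int → Int) (al : Int → Bool) : SegT → Int → Int → Prop
  | SegT.leaf mn mx, s, e =>
      e = s + 1 ∧ ((al s = true ∧ mn = val s ∧ mx = val s) ∨
                   (al s = false ∧ mn = pvINF ∧ mx = -pvINF))
  | SegT.node mn mx l r, s, e =>
      2 ≤ e - s ∧
      pvGood val al l s (PySem.Int.floordiv (s + e) 2) ∧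
      pvGood val al r (PySem.Int.floordiv (s + e) 2) e ∧
      mn = min l.mn r.mn ∧ mx = max l.mx r.mx

theorem pv_foldl_min_le (l : List Int) (c : Int) : l.foldl min c ≤ c := by
  induction l generalizing c with
  | nil => simp
  | cons x t ih => exact le_trans (ih (min c x)) (min_le_left c x)

theorem pv_le_foldl_max (l : List Int) (c : Int) : c ≤ l.foldl max c := by
  induction l generalizing c with
  | nil => simp
  | cons x t ih => exact le_trans (le_max_left c x) (ih (max c x))

theorem pv_foldl_min_min (l : List Int) (c d : Int) :
    l.foldl min (min c d) = min c (l.foldl min d) := by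
  induction l generalizing d with
  | nil => simp
  | cons x t ih =>
    simp only [List.foldl_cons]
    rw [min_assoc, ih (min d x)]

theorem pv_foldl_max_max (l : List Int) (c d : Int) :
    l.foldl max (max c d) = max c (l.foldl max d) := by
  induction l generalizing d with
  | nil => simp
  | cons x t ih =>
    simp only [List.foldl_cons]
    rw [max_assoc, ih (max d x)]

theorem pv_minfold_split (val : Int → Int) (al : Int → Bool) (s mid e : Int)
    (h1 : s ≤ mid) (h2 : mid ≤ e) :
    pvMinFold val al s e = min (pvMinFold val al s mid) (pvMinFold val al mid e) := by
  unfold pvMinFold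
  rw [PySem.List.pyRange_one_append s mid e h1 h2, List.map_append, List.foldl_append]
  have hc : ((PySem.List.pyRange s mid 1).map (pvMaskMin val al)).foldl min pvINF ≤ pvINF :=
    pv_foldl_min_le _ _
  conv_lhs => rw [← min_eq_left hc]
  rw [pv_foldl_min_min]

theorem pv_maxfold_split (val : Int → Int) (al : Int → Bool) (s mid e : Int)
    (h1 : s ≤ mid) (h2 : mid ≤ e) :
    pvMaxFold val al s e = max (pvMaxFold val al s mid) (pvMaxFold val al mid e) := by
  unfold pvMaxFold
  rw [PySem.List.pyRange_one_append s mid e h1 h2, List.map_append, List.foldl_append]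
  have hc : -pvINF ≤ ((PySem.List.pyRange s mid 1).map (pvMaskMax val al)).foldl max (-pvINF) :=
    pv_le_foldl_max _ _
  conv_lhs => rw [← max_eq_left hc]
  rw [pv_foldl_max_max]

theorem pvGood_mn (val : Int → Int) (al : Int → Bool) (t : SegT) :
    ∀ (s e : Int), (∀ i, s ≤ i → i < e → val i ≤ pvINF) → pvGood val al t s e →
      t.mn = pvMinFold val al s e := by
  induction t with
  | leaf mn mx =>
    intro s e hv hg
    obtain ⟨he, hcase⟩ := hg
    subst he
    unfold pvMinFold
    rw [PySem.List.pyRange_one_singleton]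
    simp only [List.map_cons, List.map_nil, List.foldl_cons, List.foldl_nil]
    rcases hcase with ⟨hal, hmn, _⟩ | ⟨hal, hmn, _⟩
    · simp only [SegT.mn, pvMaskMin, hal, if_true, hmn]
      exact (min_eq_right (hv s le_rfl (by omega))).symm
    · simp [SegT.mn, pvMaskMin, hal, hmn]
  | node mn mx l r ihl ihr =>
    intro s e hv hg
    obtain ⟨h2, hgl, hgr, hmn, _⟩ := hg
    have hmid := pvMidBounds s e (by omega)
    rw [pv_minfold_split val al s (PySem.Int.floordiv (s + e) 2) e (by omega) (by omega)]
    simp only [SegT.mn]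
    rw [hmn, ihl s _ (fun i h1 h2 => hv i h1 (by omega)) hgl,
        ihr _ e (fun i h1 h2 => hv i (by omega) h2) hgr]

theorem pvGood_mx (val : Int → Int) (al : Int → Bool) (t : SegT) :
    ∀ (s e : Int), (∀ i, s ≤ i → i < e → -pvINF ≤ val i) → pvGood val al t s e →
      t.mx = pvMaxFold val al s e := by
  induction t with
  | leaf mn mx =>
    intro s e hv hg
    obtain ⟨he, hcase⟩ := hg
    subst he
    unfold pvMaxFold
    rw [PySem.List.pyRange_one_singleton]
    simp only [List.map_cons, List.map_nil, List.foldl_cons, List.foldl_nil]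
    rcases hcase with ⟨hal, _, hmx⟩ | ⟨hal, _, hmx⟩
    · simp only [SegT.mx, pvMaskMax, hal, if_true, hmx]
      exact (max_eq_right (hv s le_rfl (by omega))).symm
    · simp [SegT.mx, pvMaskMax, hal, hmx]
  | node mn mx l r ihl ihr =>
    intro s e hv hg
    obtain ⟨h2, hgl, hgr, _, hmx⟩ := hg
    have hmid := pvMidBounds s e (by omega)
    rw [pv_maxfold_split val al s (PySem.Int.floordiv (s + e) 2) e (by omega) (by omega)]
    simp only [SegT.mx]
    rw [hmx, ihl s _ (fun i h1 h2 => hv i h1 (by omega)) hgl,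
        ihr _ e (fun i h1 h2 => hv i (by omega) h2) hgr]

theorem pvGood_congr (val : Int → Int) (al al' : Int → Bool) (t : SegT) :
    ∀ (s e : Int), (∀ i, s ≤ i → i < e → al i = al' i) → pvGood val al t s e →
      pvGood val al' t s e := by
  induction t with
  | leaf mn mx =>
    intro s e h hg
    obtain ⟨he, hcase⟩ := hg
    refine ⟨he, ?_⟩
    rw [← h s le_rfl (by omega)]
    exact hcase
  | node mn mx l r ihl ihr =>
    intro s e h hg
    obtain ⟨h2, hgl, hgr, hmn, hmx⟩ := hg
    have hmid := pvMidBounds s e (by omega)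
    exact ⟨h2, ihl s _ (fun i h1 h2 => h i h1 (by omega)) hgl,
           ihr _ e (fun i h1 h2 => h i (by omega) h2) hgr, hmn, hmx⟩

theorem pvGood_build (a : List Int) (s e : Int) (hse : s < e) :
    pvGood (pvVal a) (fun _ => true) (bBuild a s e) s e := by
  have H : ∀ (k : Nat) (s e : Int), (e - s).toNat = k → s < e →
      pvGood (pvVal a) (fun _ => true) (bBuild a s e) s e := by
    intro k
    induction k using Nat.strong_induction_on with
    | _ k ih =>
      intro s e hk hse
      rw [bBuild]
      by_cases h : e - s ≤ 1
      · rw [dif_pos h]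
        exact ⟨by omega, Or.inl ⟨rfl, rfl, rfl⟩⟩
      · rw [dif_neg h]
        have hmid := pvMidBounds s e h
        refine ⟨by omega, ?_, ?_, rfl, rfl⟩
        · exact ih ((PySem.Int.floordiv (s + e) 2 - s).toNat) (by omega) _ _ rfl (by omega)
        · exact ih ((e - PySem.Int.floordiv (s + e) 2).toNat) (by omega) _ _ rfl (by omega)
  exact H (e - s).toNat s e rfl hse

theorem pvGood_kill (val : Int → Int) (al : Int → Bool) (t : SegT) :
    ∀ (s e i : Int), pvGood val al t s e → s ≤ i → i < e →
      pvGood val (fun x => if x = i then false else al x) (bKill t s e i) s e := by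
  induction t with
  | leaf mn mx =>
    intro s e i hg h1 h2
    obtain ⟨he, _⟩ := hg
    have : i = s := by omega
    subst this
    exact ⟨he, Or.inr ⟨by simp, rfl, rfl⟩⟩
  | node mn mx l r ihl ihr =>
    intro s e i hg h1 h2
    obtain ⟨hd, hgl, hgr, _, _⟩ := hg
    have hmid := pvMidBounds s e (by omega)
    simp only [bKill]
    by_cases hi : i < PySem.Int.floordiv (s + e) 2
    · rw [if_pos hi]
      refine ⟨hd, ihl s _ i hgl h1 hi, ?_, rfl, rfl⟩
      exact pvGood_congr val al _ r _ e (fun x hx1 _ => by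
        have : x ≠ i := by omega
        simp [this]) hgr
    · rw [if_neg hi]
      refine ⟨hd, ?_, ihr _ e i hgr (by omega) h2, rfl, rfl⟩
      exact pvGood_congr val al _ l s _ (fun x _ hx2 => by
        have : x ≠ i := by omega
        simp [this]) hgl

theorem pv_maxFrom (val : Int → Int) (al : Int → Bool) (t : SegT) :
    ∀ (s e lo : Int), (∀ i, s ≤ i → i < e → -pvINF ≤ val i) → pvGood val al t s e →
      bMaxFrom t s e lo = pvMaxFold val al (max s lo) e := by
  induction t with
  | leaf mn mx =>
    intro s e lo hv hg
    have hg' := hg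
    obtain ⟨he, -⟩ := hg
    simp only [bMaxFrom]
    by_cases hlo : lo ≤ s
    · rw [if_pos hlo, max_eq_left (by omega)]
      exact pvGood_mx val al (SegT.leaf mn mx) s e hv hg'
    · rw [if_neg hlo]
      have : e ≤ max s lo := by omega
      unfold pvMaxFold
      rw [PySem.List.pyRange_one_eq_nil this]
      simp
  | node mn mx l r ihl ihr =>
    intro s e lo hv hg
    have hg' := hg
    obtain ⟨hd, hgl, hgr, -, -⟩ := hg
    have hmid := pvMidBounds s e (by omega)
    simp only [bMaxFrom]
    by_cases hlo : lo ≤ s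
    · rw [if_pos hlo, max_eq_left (by omega)]
      exact pvGood_mx val al (SegT.node mn mx l r) s e hv hg'
    · rw [if_neg hlo]
      by_cases hee : e ≤ lo
      · rw [if_pos hee]
        unfold pvMaxFold
        rw [PySem.List.pyRange_one_eq_nil (by omega : e ≤ max s lo)]
        simp
      · rw [if_neg hee]
        rw [ihl s _ lo (fun i h1 h2 => hv i h1 (by omega)) hgl,
            ihr _ e lo (fun i h1 h2 => hv i (by omega) h2) hgr]
        rw [max_eq_right (by omega : s ≤ lo)]
        by_cases hm : lo ≤ PySem.Int.floordiv (s + e) 2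
        · rw [max_eq_left hm]
          exact (pv_maxfold_split val al lo _ e hm (by omega)).symm
        · rw [max_eq_right (by omega : PySem.Int.floordiv (s + e) 2 ≤ lo)]
          have h1 : pvMaxFold val al lo (PySem.Int.floordiv (s + e) 2) = -pvINF := by
            unfold pvMaxFold
            rw [PySem.List.pyRange_one_eq_nil (by omega)]
            rfl
          rw [h1]
          exact max_eq_right (by unfold pvMaxFold; exact pv_le_foldl_max _ _)

theorem pv_mask_filter_min (val : Int → Int) (al : Int → Bool) (l : List Int) :
    ∀ (c : Int), c ≤ pvINF → (∀ i ∈ l, val i ≤ pvINF) →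
      (l.map (pvMaskMin val al)).foldl min c = ((l.filter al).map val).foldl min c := by
  induction l with
  | nil => intro c _ _; rfl
  | cons x t ih =>
    intro c hc hv
    by_cases hal : al x
    · simp only [List.map_cons, List.filter_cons, hal, if_true, List.foldl_cons,
        pvMaskMin]
      exact ih (min c (val x)) (le_trans (min_le_left _ _) hc)
        (fun i hi => hv i (List.mem_cons_of_mem x hi))
    · simp only [List.map_cons, List.filter_cons, hal, Bool.false_eq_true, if_false,
        List.foldl_cons, pvMaskMin]
      rw [min_eq_left hc]
      exact ih c hc (fun i hi => hv i (List.mem_cons_of_mem x hi))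

theorem pv_mask_filter_max (val : Int → Int) (al : Int → Bool) (l : List Int) :
    ∀ (c : Int), -pvINF ≤ c → (∀ i ∈ l, -pvINF ≤ val i) →
      (l.map (pvMaskMax val al)).foldl max c = ((l.filter al).map val).foldl max c := by
  induction l with
  | nil => intro c _ _; rfl
  | cons x t ih =>
    intro c hc hv
    by_cases hal : al x
    · simp only [List.map_cons, List.filter_cons, hal, if_true, List.foldl_cons,
        pvMaskMax]
      exact ih (max c (val x)) (le_trans hc (le_max_left _ _))
        (fun i hi => hv i (List.mem_cons_of_mem x hi))
    · simp only [List.map_cons, List.filter_cons, hal, Bool.false_eq_true, if_false,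
        List.foldl_cons, pvMaskMax]
      rw [max_eq_left hc]
      exact ih c hc (fun i hi => hv i (List.mem_cons_of_mem x hi))

theorem pv_filter_range (L : List Int) : ∀ (s e : Int),
    L.Pairwise (· < ·) → (∀ i ∈ L, s ≤ i ∧ i < e) →
    (PySem.List.pyRange s e 1).filter (fun i => decide (i ∈ L)) = L := by
  suffices H : ∀ (k : Nat) (s e : Int) (L : List Int), (e - s).toNat = k →
      L.Pairwise (· < ·) → (∀ i ∈ L, s ≤ i ∧ i < e) →
      (PySem.List.pyRange s e 1).filter (fun i => decide (i ∈ L)) = L by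
    intro s e h1 h2
    exact H (e - s).toNat s e L rfl h1 h2
  intro k
  induction k using Nat.strong_induction_on with
  | _ k ih =>
    intro s e L hk hp hbnd
    by_cases hse : e ≤ s
    · rw [PySem.List.pyRange_one_eq_nil hse]
      cases L with
      | nil => rfl
      | cons x t =>
        have := hbnd x (by simp)
        omega
    · rw [PySem.List.pyRange_one_cons (by omega)]
      by_cases hs : s ∈ L
      · cases L with
        | nil => simp at hs
        | cons x t =>
          have hpc := List.pairwise_cons.mp hp
          have hxs : x = s := by
            rcases List.mem_cons.mp hs with h | h
            · exact h.symm
            · have h1 := hpc.1 s h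
              have h2 := (hbnd x (by simp)).1
              omega
          subst hxs
          rw [List.filter_cons_of_pos (by simp)]
          congr 1
          have hcg : ∀ i ∈ PySem.List.pyRange (x + 1) e 1,
              (decide (i ∈ x :: t)) = (decide (i ∈ t)) := by
            intro i hi
            have hib := PySem.List.mem_pyRange_one.mp hi
            simp only [List.mem_cons, decide_eq_decide]
            constructor
            · rintro (h | h)
              · omega
              · exact h
            · exact Or.inr
          rw [List.filter_congr hcg]
          exact ih ((e - (x + 1)).toNat) (by omega) (x + 1) e t rfl hpc.2
            (fun i hi => ⟨by have := hpc.1 i hi; omega,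
                          (hbnd i (List.mem_cons_of_mem x hi)).2⟩)
      · rw [List.filter_cons_of_neg (by simpa using hs)]
        exact ih ((e - (s + 1)).toNat) (by omega) (s + 1) e L rfl hp
          (fun i hi => ⟨by
            rcases eq_or_ne i s with h | h
            · exact absurd (h ▸ hi) hs
            · have := (hbnd i hi).1; omega,
           (hbnd i hi).2⟩)

theorem pv_remove_map (val : Int → Int) (v : Int) : ∀ (L : List Int),
    (∃ i ∈ L, val i = v) →
    PySem.List.remove? (L.map val) v = some ((L.eraseP (fun i => val i == v)).map val) := by
  intro L
  induction L with
  | nil => rintro ⟨i, hi, -⟩; simp at hi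
  | cons x t ih =>
    rintro ⟨i, hi, hv⟩
    by_cases hx : val x = v
    · simp only [List.map_cons]
      rw [hx, PySem.List.remove?_cons_self, List.eraseP_cons_of_pos (by simp [hx])]
    · simp only [List.map_cons]
      rw [PySem.List.remove?_cons_of_ne (List.map val t) hx]
      have hex : ∃ i ∈ t, val i = v := by
        rcases List.mem_cons.mp hi with h | h
        · exact absurd (h ▸ hv) hx
        · exact ⟨i, h, hv⟩
      rw [ih hex, List.eraseP_cons_of_neg (by simp [hx])]
      simp

-- the workhorse decomposition: filter p L = j :: rest names the element eraseP removes
theorem pv_eraseP_of_filter (p : Int → Bool) : ∀ (L : List Int) (j : Int) (rest : List Int),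
    L.filter p = j :: rest →
    ∃ F B, L = F ++ j :: B ∧ (∀ x ∈ F, p x = false) ∧ L.eraseP p = F ++ B ∧
           rest = B.filter p := by
  intro L
  induction L with
  | nil => intro j rest h; simp at h
  | cons x t ih =>
    intro j rest h
    by_cases hp : p x
    · rw [List.filter_cons_of_pos hp] at h
      obtain ⟨h1, h2⟩ := List.cons_eq_cons.mp h
      refine ⟨[], t, by simp [h1], by simp, ?_, h2.symm⟩
      rw [List.eraseP_cons_of_pos hp]
      simp
    · rw [List.filter_cons_of_neg hp] at h
      obtain ⟨F, B, hL, hF, hE, hR⟩ := ih j rest h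
      refine ⟨x :: F, B, by simp [hL], ?_, ?_, hR⟩
      · intro y hy
        rcases List.mem_cons.mp hy with h' | h'
        · subst h'; simpa using hp
        · exact hF y h'
      · rw [List.eraseP_cons_of_neg hp, hE]
        simp

theorem pv_getD_append (dead rest : List Int) (k : Nat) :
    (dead ++ rest).getD (dead.length + k) 0 = rest.getD k 0 := by
  induction dead with
  | nil => simp
  | cons x td ih =>
    simp only [List.cons_append, List.length_cons]
    have h : td.length + 1 + k = (td.length + k) + 1 := by omega
    rw [h, List.getD_cons_succ, ih]

theorem pv_head_init (ks : List Int) : ∀ (d : PySem.Dict Int Int),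
    (∀ w, d.getD w 0 = 0) →
    ∀ w, (ks.foldl (fun h v => h.insert v 0) d).getD w 0 = 0 := by
  induction ks with
  | nil => intro d h w; exact h w
  | cons x t ih =>
    intro d h w
    apply ih
    intro w'
    rw [PySem.Dict.getD_insert]
    split
    · rfl
    · exact h w'

theorem pv_pos_init (a : List Int) (n : Int) (v : Int) :
    ((PySem.List.pyRange 0 n 1).foldl
        (fun d i => d.modify (PySem.List.pyGetD a i 0) [] (· ++ [i])) PySem.Dict.empty).getD v []
      = (PySem.List.pyRange 0 n 1).filter (fun i => pvVal a i == v) := by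
  have key := PySem.Dict.getD_foldl_modify_append
    (l := (PySem.List.pyRange 0 n 1).map (fun i => ((PySem.List.pyGetD a i 0 : Int), i)))
    (d := (PySem.Dict.empty : PySem.Dict Int (List Int))) (c := v)
  rw [List.foldl_map] at key
  simpa [pvVal, List.filter_map, List.map_map, Function.comp_def] using key

theorem pv_hb (a : List Int) (hDom : Dom_solution a) :
    ∀ i : Int, 0 ≤ i → i < (a.length : Int) → -pvINF < pvVal a i ∧ pvVal a i < pvINF := by
  intro i h0 hlt
  unfold pvVal
  have hi : i = ((i.toNat : Nat) : Int) := by omega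
  rw [hi, PySem.List.pyGetD_natCast]
  have hl : i.toNat < a.length := by omega
  rw [List.getD_eq_getElem a 0 hl]
  have hm : a[i.toNat] ∈ a := List.getElem_mem hl
  unfold Dom_solution at hDom
  rw [List.all_eq_true] at hDom
  have hd := hDom _ hm
  simp only [pvDomInt, decide_eq_true_eq] at hd
  unfold pvINF
  omega

theorem pvStepA_nil (fa : Nat) (ans : Int) : pyALoop (fa + 1) [] ans = ans := by
  simp [pyALoop]

theorem pvStepA_break (fa : Nat) (prices : List Int) (ans minPrice : Int) (minIndex : Nat)
    (h0 : prices.length ≠ 0)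
    (h1 : PySem.List.min? prices (fun x => x) = some minPrice)
    (h2 : PySem.List.index? prices minPrice = some minIndex)
    (h3 : (minIndex : Int) ≠ (prices.length : Int))
    (h4 : PySem.List.slice prices (some ((minIndex : Int) + 1)) none = []) :
    pyALoop (fa + 1) prices ans = ans := by
  rw [PySem.List.index?_eq_idxOf?] at h2
  have h3' : minIndex ≠ prices.length := by intro h; exact h3 (by exact_mod_cast h)
  simp [pyALoop, h0, h1, h2, h3', h4]

theorem pvStepA (fa : Nat) (prices : List Int) (ans minPrice maxPrice : Int)
    (minIndex mi2 : Nat) (mrl p1 p2 : List Int)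
    (h0 : prices.length ≠ 0)
    (h1 : PySem.List.min? prices (fun x => x) = some minPrice)
    (h2 : PySem.List.index? prices minPrice = some minIndex)
    (h3 : (minIndex : Int) ≠ (prices.length : Int))
    (h4 : PySem.List.slice prices (some ((minIndex : Int) + 1)) none = mrl)
    (h5 : mrl.length ≠ 0)
    (h6 : PySem.List.max? mrl (fun x => x) = some maxPrice)
    (h7 : PySem.List.index? prices maxPrice = some mi2)
    (h8 : PySem.List.remove? prices maxPrice = some p1)
    (h9 : PySem.List.remove? p1 minPrice = some p2) :
    pyALoop (fa + 1) prices ans = pyALoop fa p2 (ans + (maxPrice - minPrice)) := by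
  rw [PySem.List.index?_eq_idxOf?] at h2 h7
  have h3' : minIndex ≠ prices.length := by intro h; exact h3 (by exact_mod_cast h)
  simp [pyALoop, h0, h1, h2, h3', h4, h5, h6, h7, h8, h9]

theorem pvSim (a : List Int) (n : Int) (hn : n = (a.length : Int))
    (hb : ∀ i : Int, 0 ≤ i → i < n → -pvINF < pvVal a i ∧ pvVal a i < pvINF) :
    ∀ (cnt : Nat) (L : List Int) (t : SegT) (pos : PySem.Dict Int (List Int))
      (head : PySem.Dict Int Int) (fuelA fuelB : Nat) (ans : Int),
      L.length = cnt →
      L.Pairwise (· < ·) → (∀ i ∈ L, 0 ≤ i ∧ i < n) →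
      pvGood (pvVal a) (fun i => decide (i ∈ L)) t 0 n →
      (∀ v : Int, pos.getD v [] = (PySem.List.pyRange 0 n 1).filter (fun i => pvVal a i == v)) →
      (∀ v : Int, ∃ dead : List Int,
          (PySem.List.pyRange 0 n 1).filter (fun i => pvVal a i == v)
            = dead ++ L.filter (fun i => pvVal a i == v) ∧ head.getD v 0 = (dead.length : Int)) →
      L.length < 2 * fuelA → L.length < 2 * fuelB →
      pyALoop fuelA (L.map (pvVal a)) ans = bLoop fuelB t pos head n (L.length : Int) ans := by
  intro cnt
  induction cnt using Nat.strong_induction_on with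
  | _ cnt ih =>
    intro L t pos head fuelA fuelB ans hcnt hpw hbnd hgood hpos hhead hfA hfB
    have hA1 : fuelA ≠ 0 := by intro h; subst h; omega
    have hB1 : fuelB ≠ 0 := by intro h; subst h; omega
    obtain ⟨fa, rfl⟩ : ∃ k, fuelA = k + 1 :=
      ⟨fuelA - 1, (Nat.succ_pred_eq_of_pos (Nat.pos_of_ne_zero hA1)).symm⟩
    obtain ⟨fb, rfl⟩ : ∃ k, fuelB = k + 1 :=
      ⟨fuelB - 1, (Nat.succ_pred_eq_of_pos (Nat.pos_of_ne_zero hB1)).symm⟩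
    cases L with
    | nil =>
      rw [List.map_nil, pvStepA_nil]
      simp [bLoop]
    | cons i0 L'' =>
      set LL : List Int := i0 :: L'' with hLL
      have hmemi0 : i0 ∈ LL := by rw [hLL]; exact List.mem_cons_self
      have hval : ∀ i ∈ LL, -pvINF < pvVal a i ∧ pvVal a i < pvINF :=
        fun i hi => hb i (hbnd i hi).1 (hbnd i hi).2
      have hvle : ∀ i : Int, 0 ≤ i → i < n → pvVal a i ≤ pvINF :=
        fun i h1 h2 => (hb i h1 h2).2.le
      have hvge : ∀ i : Int, 0 ≤ i → i < n → -pvINF ≤ pvVal a i :=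
        fun i h1 h2 => (hb i h1 h2).1.le
      have halive : ¬ ((LL.length : Int) ≤ 0) := by
        rw [hLL, List.length_cons]; push_cast; omega
      have hmin : PySem.List.min? (LL.map (pvVal a)) (fun x => x)
          = some ((L''.map (pvVal a)).foldl min (pvVal a i0)) := by
        rw [hLL, List.map_cons]
        exact PySem.List.min?_id_cons _ _
      set mval := (L''.map (pvVal a)).foldl min (pvVal a i0) with hmvaldef
      have hmvalmem : mval ∈ LL.map (pvVal a) := PySem.List.min?_mem hmin
      have hm : t.mn = mval := by
        rw [pvGood_mn (pvVal a) (fun i => decide (i ∈ LL)) t 0 n hvle hgood]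
        unfold pvMinFold
        rw [pv_mask_filter_min (pvVal a) (fun i => decide (i ∈ LL)) (PySem.List.pyRange 0 n 1)
              pvINF le_rfl
              (fun i hi => by
                have h := PySem.List.mem_pyRange_one.mp hi
                exact hvle i h.1 h.2),
            pv_filter_range LL 0 n hpw hbnd, hLL, List.map_cons, List.foldl_cons,
            min_eq_right (hvle i0 (hbnd i0 hmemi0).1 (hbnd i0 hmemi0).2)]
      obtain ⟨kk, hkk⟩ : ∃ kk, PySem.List.index? (LL.map (pvVal a)) mval = some kk :=
        Option.isSome_iff_exists.mp (Iff.mpr (PySem.List.index?_isSome_iff _ _) hmvalmem)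
      obtain ⟨pre, suf, hxs, hlenpre, hvpre⟩ := Iff.mp (PySem.List.index?_eq_some_iff _ _ _) hkk
      obtain ⟨Lp, rest1, hLL2, hmapLp, hmaprest⟩ := List.map_eq_append_iff.mp hxs
      obtain ⟨p, Ls, hrest1, hvalp, hmapLs⟩ := List.map_eq_cons_iff.mp hmaprest
      subst hrest1
      have hsplit : LL = Lp ++ p :: Ls := hLL2
      have hpmem : p ∈ LL := by rw [hsplit]; exact List.mem_append_right _ List.mem_cons_self
      have hLpnotm : ∀ i ∈ Lp, pvVal a i ≠ mval := by
        intro i hi hcon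
        exact hvpre (by rw [← hmapLp]; exact List.mem_map.mpr ⟨i, hi, hcon⟩)
      have hfLp : Lp.filter (fun i => pvVal a i == mval) = [] :=
        List.filter_eq_nil_iff.mpr (fun i hi => by simpa using hLpnotm i hi)
      have hfL : LL.filter (fun i => pvVal a i == mval)
          = p :: Ls.filter (fun i => pvVal a i == mval) := by
        rw [hsplit, List.filter_append, hfLp, List.filter_cons_of_pos (by simp [hvalp])]
        simp
      have hpwAll : (Lp ++ p :: Ls).Pairwise (· < ·) := hsplit ▸ hpw
      have hpwparts := List.pairwise_append.mp hpwAll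
      have hpls : ∀ y ∈ Ls, p < y := (List.pairwise_cons.mp hpwparts.2.1).1
      have hlpLt : ∀ x ∈ Lp, x < p := fun x hx => hpwparts.2.2 x hx p List.mem_cons_self
      have hmemLs : ∀ i : Int, p + 1 ≤ i → ((i ∈ LL) ↔ i ∈ Ls) := by
        intro i hig
        rw [hsplit]
        simp only [List.mem_append, List.mem_cons]
        constructor
        · rintro (h | h | h)
          · exact absurd (hlpLt i h) (by omega)
          · exact absurd h (by omega)
          · exact h
        · intro h; exact Or.inr (Or.inr h)
      obtain ⟨deadm, hdm, hheadm⟩ := hhead mval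
      have hposm : pos.getD mval []
          = deadm ++ p :: Ls.filter (fun i => pvVal a i == mval) := by
        rw [hpos mval, hdm, hfL]
      have hp_eq : PySem.List.pyGetD (pos.getD mval []) (head.getD mval 0) 0 = p := by
        rw [hposm, hheadm, PySem.List.pyGetD_natCast]
        simpa using pv_getD_append deadm (p :: Ls.filter (fun i => pvVal a i == mval)) 0
      have hlenLL : LL.length = Lp.length + 1 + Ls.length := by
        rw [hsplit]; simp [List.length_append]; omega
      have hkkval : kk = Lp.length := by rw [← hlenpre, ← hmapLp]; simp
      have hk3 : (kk : Int) ≠ ((LL.map (pvVal a)).length : Int) := by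
        simp only [List.length_map]
        rw [hkkval, hlenLL]; push_cast; omega
      have hslice : PySem.List.slice (LL.map (pvVal a)) (some ((kk : Int) + 1)) none
          = Ls.map (pvVal a) := by
        have hc : ((kk : Int) + 1) = (((kk + 1 : Nat)) : Int) := by push_cast; ring
        rw [hc, PySem.List.slice_from_natCast]
        rw [hsplit, List.map_append, List.map_cons]
        have h2 : List.map (pvVal a) Lp ++ pvVal a p :: List.map (pvVal a) Ls
            = (List.map (pvVal a) Lp ++ [pvVal a p]) ++ List.map (pvVal a) Ls := by simp
        rw [h2]
        have h3 : kk + 1 = (List.map (pvVal a) Lp ++ [pvVal a p]).length := by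
          simp [hkkval]
        rw [h3, List.drop_left]
      have hMfold : bMaxFrom t 0 n (p + 1) = ((Ls.map (pvVal a)).foldl max (-pvINF)) := by
        rw [pv_maxFrom (pvVal a) (fun i => decide (i ∈ LL)) t 0 n (p + 1) hvge hgood]
        rw [max_eq_right (by have := (hbnd p hpmem).1; omega : (0:Int) ≤ p + 1)]
        unfold pvMaxFold
        rw [pv_mask_filter_max (pvVal a) (fun i => decide (i ∈ LL))
              (PySem.List.pyRange (p+1) n 1) (-pvINF) le_rfl
              (fun i hi => by
                have h := PySem.List.mem_pyRange_one.mp hi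
                have := (hbnd p hpmem).1
                exact hvge i (by omega) h.2)]
        have hcg : ∀ i ∈ PySem.List.pyRange (p+1) n 1,
            (decide (i ∈ LL)) = (decide (i ∈ Ls)) := by
          intro i hi
          have h := PySem.List.mem_pyRange_one.mp hi
          simp only [decide_eq_decide]
          exact hmemLs i h.1
        rw [List.filter_congr hcg,
            pv_filter_range Ls (p+1) n (List.Pairwise.of_cons hpwparts.2.1)
              (fun i hi => ⟨by have := hpls i hi; omega,
                (hbnd i (by rw [hsplit]; exact List.mem_append_right _ (List.mem_cons_of_mem _ hi))).2⟩)]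
      cases Ls with
      | nil =>
        rw [pvStepA_break fa _ ans mval kk (by simp [hLL]) hmin hkk hk3 (by simpa using hslice)]
        simp only [bLoop]
        rw [if_neg halive, hm, hp_eq, hMfold]
        simp
      | cons s0 Ls' =>
        have hmax : PySem.List.max? ((s0 :: Ls').map (pvVal a)) (fun x => x)
            = some ((Ls'.map (pvVal a)).foldl max (pvVal a s0)) := by
          rw [List.map_cons]
          exact PySem.List.max?_id_cons _ _
        set Mval := (Ls'.map (pvVal a)).foldl max (pvVal a s0) with hMdef
        have hs0mem : s0 ∈ LL := by
          rw [hsplit]; exact List.mem_append_right _ (List.mem_cons_of_mem _ List.mem_cons_self)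
        have hMfold2 : bMaxFrom t 0 n (p + 1) = Mval := by
          rw [hMfold, List.map_cons, List.foldl_cons,
              max_eq_right (hvge s0 (hbnd s0 hs0mem).1 (hbnd s0 hs0mem).2)]
        have hMmem' : Mval ∈ (s0 :: Ls').map (pvVal a) := PySem.List.max?_mem hmax
        obtain ⟨w, hwLs, hwval⟩ := List.mem_map.mp hMmem'
        have hwLL : w ∈ LL := by
          rw [hsplit]; exact List.mem_append_right _ (List.mem_cons_of_mem _ hwLs)
        have hMne : Mval ≠ -pvINF := by
          intro h
          rw [← hwval] at h
          have := (hval w hwLL).1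
          omega
        have hMmemLL : Mval ∈ LL.map (pvVal a) := List.mem_map.mpr ⟨w, hwLL, hwval⟩
        obtain ⟨mi2, hmi2⟩ : ∃ mi2, PySem.List.index? (LL.map (pvVal a)) Mval = some mi2 :=
          Option.isSome_iff_exists.mp (Iff.mpr (PySem.List.index?_isSome_iff _ _) hMmemLL)
        have hrem1 := pv_remove_map (pvVal a) Mval LL ⟨w, hwLL, hwval⟩
        have hwfilter : w ∈ LL.filter (fun i => pvVal a i == Mval) :=
          List.mem_filter.mpr ⟨hwLL, by simp [hwval]⟩
        obtain ⟨j0, Mrest, hfM⟩ : ∃ j0 Mrest,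
            LL.filter (fun i => pvVal a i == Mval) = j0 :: Mrest := by
          cases hc : LL.filter (fun i => pvVal a i == Mval) with
          | nil => rw [hc] at hwfilter; cases hwfilter
          | cons x xs => exact ⟨x, xs, rfl⟩
        obtain ⟨F1, B1, hsp1, hF1, hE1, hR1⟩ := pv_eraseP_of_filter _ LL j0 Mrest hfM
        set L1 : List Int := F1 ++ B1 with hL1def
        rw [hE1] at hrem1
        have hj0mem : j0 ∈ LL := by rw [hsp1]; exact List.mem_append_right _ List.mem_cons_self
        have hvj0 : pvVal a j0 = Mval := by
          have h : j0 ∈ LL.filter (fun i => pvVal a i == Mval) := by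
            rw [hfM]; exact List.mem_cons_self
          simpa using (List.mem_filter.mp h).2
        obtain ⟨deadM, hdM, hheadM⟩ := hhead Mval
        have hj_eq : PySem.List.pyGetD (pos.getD Mval []) (head.getD Mval 0) 0 = j0 := by
          rw [hpos Mval, hdM, hfM, hheadM, PySem.List.pyGetD_natCast]
          simpa using pv_getD_append deadM (j0 :: Mrest) 0
        have hnodupLL : LL.Nodup := hpw.imp (fun h => ne_of_lt h)
        have hnodsp1 : (F1 ++ j0 :: B1).Nodup := hsp1 ▸ hnodupLL
        have hj0n : j0 ∉ F1 ∧ j0 ∉ B1 := by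
          have hnm : j0 ∉ F1 ++ B1 := (List.nodup_cons.mp (List.nodup_middle.mp hnodsp1)).1
          exact ⟨fun hc => hnm (List.mem_append.mpr (Or.inl hc)),
                 fun hc => hnm (List.mem_append.mpr (Or.inr hc))⟩
        have hmem1 : ∀ x : Int, x ∈ L1 ↔ (x ∈ LL ∧ x ≠ j0) := by
          intro x
          rw [hL1def, hsp1]
          simp only [List.mem_append, List.mem_cons]
          constructor
          · rintro (h | h)
            · exact ⟨Or.inl h, fun hx => hj0n.1 (hx ▸ h)⟩
            · exact ⟨Or.inr (Or.inr h), fun hx => hj0n.2 (hx ▸ h)⟩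
          · rintro ⟨h | h | h, hne⟩
            · exact Or.inl h
            · exact absurd h hne
            · exact Or.inr h
        have hsub1 : L1.Sublist LL := by
          rw [← hE1]; exact List.eraseP_sublist
        have hpw1 : L1.Pairwise (· < ·) := hpw.sublist hsub1
        have hbnd1 : ∀ i ∈ L1, 0 ≤ i ∧ i < n := fun i hi => hbnd i (hsub1.subset hi)
        have hg1 : pvGood (pvVal a) (fun i => decide (i ∈ L1)) (bKill t 0 n j0) 0 n := by
          have h := pvGood_kill (pvVal a) (fun i => decide (i ∈ LL)) t 0 n j0 hgood
            (hbnd j0 hj0mem).1 (hbnd j0 hj0mem).2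
          refine pvGood_congr _ _ _ _ 0 n (fun x _ _ => ?_) h
          by_cases hx : x = j0
          · subst hx; simp [hmem1]
          · simp only [if_neg hx, decide_eq_decide]
            rw [hmem1]
            simp [hx]
        have hfilter1 : ∀ v : Int, L1.filter (fun i => pvVal a i == v)
            = if v = Mval then Mrest else LL.filter (fun i => pvVal a i == v) := by
          intro v
          by_cases hv : v = Mval
          · subst hv
            rw [if_pos rfl, hL1def, List.filter_append,
                List.filter_eq_nil_iff.mpr (fun x hx => by simp [hF1 x hx]), hR1]
            simp
          · rw [if_neg hv, hL1def, hsp1, List.filter_append, List.filter_append,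
                List.filter_cons_of_neg (by simp [hvj0]; exact fun hc => hv hc.symm)]
        obtain ⟨q0, rest2, hfM2, hq_eq⟩ : ∃ q0 rest2,
            L1.filter (fun i => pvVal a i == mval) = q0 :: rest2 ∧
            PySem.List.pyGetD (pos.getD mval [])
              ((head.insert Mval (head.getD Mval 0 + 1)).getD mval 0) 0 = q0 := by
          by_cases hMm : mval = Mval
          · have hLLm : LL.filter (fun i => pvVal a i == mval) = j0 :: Mrest := by
              rw [hMm]; exact hfM
            have hMrest : Mrest = (s0 :: Ls').filter (fun i => pvVal a i == mval) := by
              have := hLLm.symm.trans hfL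
              exact (List.cons_eq_cons.mp this).2
            have hwMrest : w ∈ Mrest := by
              rw [hMrest]
              exact List.mem_filter.mpr ⟨hwLs, by simp [hwval, hMm]⟩
            obtain ⟨q0, rest2, hMr2⟩ : ∃ q0 rest2, Mrest = q0 :: rest2 := by
              cases hc : Mrest with
              | nil => rw [hc] at hwMrest; cases hwMrest
              | cons x xs => exact ⟨x, xs, rfl⟩
            refine ⟨q0, rest2, ?_, ?_⟩
            · rw [hfilter1 mval, if_pos hMm, hMr2]
            · rw [hpos mval, hdm, hLLm, hMr2, PySem.Dict.getD_insert, if_pos hMm, ← hMm,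
                  hheadm]
              have hc : (deadm.length : Int) + 1 = ((deadm.length + 1 : Nat) : Int) := by
                push_cast; ring
              rw [hc, PySem.List.pyGetD_natCast]
              simpa using pv_getD_append deadm (j0 :: q0 :: rest2) 1
          · refine ⟨p, (s0 :: Ls').filter (fun i => pvVal a i == mval), ?_, ?_⟩
            · rw [hfilter1 mval, if_neg hMm, hfL]
            · rw [PySem.Dict.getD_insert, if_neg hMm]
              exact hp_eq
        obtain ⟨F2, B2, hsp2, hF2, hE2, hR2⟩ := pv_eraseP_of_filter _ L1 q0 rest2 hfM2
        set L2 : List Int := F2 ++ B2 with hL2def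
        have hq0memL1 : q0 ∈ L1 := by
          rw [hsp2]; exact List.mem_append_right _ List.mem_cons_self
        have hvq0 : pvVal a q0 = mval := by
          have h : q0 ∈ L1.filter (fun i => pvVal a i == mval) := by
            rw [hfM2]; exact List.mem_cons_self
          simpa using (List.mem_filter.mp h).2
        have hrem2 := pv_remove_map (pvVal a) mval L1 ⟨q0, hq0memL1, hvq0⟩
        rw [hE2] at hrem2
        have hnodup1 : L1.Nodup := hnodupLL.sublist hsub1
        have hnodsp2 : (F2 ++ q0 :: B2).Nodup := hsp2 ▸ hnodup1
        have hq0n : q0 ∉ F2 ∧ q0 ∉ B2 := by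
          have hnm : q0 ∉ F2 ++ B2 := (List.nodup_cons.mp (List.nodup_middle.mp hnodsp2)).1
          exact ⟨fun hc => hnm (List.mem_append.mpr (Or.inl hc)),
                 fun hc => hnm (List.mem_append.mpr (Or.inr hc))⟩
        have hmem2 : ∀ x : Int, x ∈ L2 ↔ (x ∈ L1 ∧ x ≠ q0) := by
          intro x
          rw [hL2def, hsp2]
          simp only [List.mem_append, List.mem_cons]
          constructor
          · rintro (h | h)
            · exact ⟨Or.inl h, fun hx => hq0n.1 (hx ▸ h)⟩
            · exact ⟨Or.inr (Or.inr h), fun hx => hq0n.2 (hx ▸ h)⟩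
          · rintro ⟨h | h | h, hne⟩
            · exact Or.inl h
            · exact absurd h hne
            · exact Or.inr h
        have hsub2 : L2.Sublist L1 := by
          rw [← hE2]; exact List.eraseP_sublist
        have hpw2 : L2.Pairwise (· < ·) := hpw1.sublist hsub2
        have hbnd2 : ∀ i ∈ L2, 0 ≤ i ∧ i < n := fun i hi => hbnd1 i (hsub2.subset hi)
        have hg2 : pvGood (pvVal a) (fun i => decide (i ∈ L2))
            (bKill (bKill t 0 n j0) 0 n q0) 0 n := by
          have h := pvGood_kill (pvVal a) (fun i => decide (i ∈ L1)) (bKill t 0 n j0) 0 n q0 hg1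
            (hbnd1 q0 hq0memL1).1 (hbnd1 q0 hq0memL1).2
          refine pvGood_congr _ _ _ _ 0 n (fun x _ _ => ?_) h
          by_cases hx : x = q0
          · subst hx; simp [hmem2]
          · simp only [if_neg hx, decide_eq_decide]
            rw [hmem2]
            simp [hx]
        have hfilter2 : ∀ v : Int, L2.filter (fun i => pvVal a i == v)
            = if v = mval then rest2 else L1.filter (fun i => pvVal a i == v) := by
          intro v
          by_cases hv : v = mval
          · subst hv
            rw [if_pos rfl, hL2def, List.filter_append,
                List.filter_eq_nil_iff.mpr (fun x hx => by simp [hF2 x hx]), hR2]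
            simp
          · rw [if_neg hv, hL2def, hsp2, List.filter_append, List.filter_append,
                List.filter_cons_of_neg (by simp [hvq0]; exact fun hc => hv hc.symm)]
        have hhead2 : ∀ v : Int, ∃ dead : List Int,
            (PySem.List.pyRange 0 n 1).filter (fun i => pvVal a i == v)
              = dead ++ L2.filter (fun i => pvVal a i == v) ∧
            ((head.insert Mval (head.getD Mval 0 + 1)).insert mval
              ((head.insert Mval (head.getD Mval 0 + 1)).getD mval 0 + 1)).getD v 0
              = (dead.length : Int) := by
          intro v
          obtain ⟨dv, hdv, hhv⟩ := hhead v
          by_cases hv1 : v = mval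
          · subst hv1
            by_cases hv2 : mval = Mval
            · refine ⟨dv ++ [j0, q0], ?_, ?_⟩
              · have hLf : LL.filter (fun i => pvVal a i == mval) = j0 :: Mrest := by
                  rw [hv2]; exact hfM
                have hMr : Mrest = q0 :: rest2 := by
                  have h := hfilter1 mval
                  rw [if_pos hv2] at h
                  rw [← h, hfM2]
                rw [hdv, hLf, hMr, hfilter2 mval, if_pos rfl]
                simp
              · rw [PySem.Dict.getD_insert, if_pos rfl, PySem.Dict.getD_insert, if_pos hv2,
                    ← hv2, hhv]
                simp only [List.length_append, List.length_cons, List.length_nil]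
                push_cast
                omega
            · refine ⟨dv ++ [q0], ?_, ?_⟩
              · have hLf : L1.filter (fun i => pvVal a i == mval)
                    = LL.filter (fun i => pvVal a i == mval) := by
                  rw [hfilter1 mval, if_neg hv2]
                rw [hdv, ← hLf, hfM2, hfilter2 mval, if_pos rfl]
                simp
              · rw [PySem.Dict.getD_insert, if_pos rfl, PySem.Dict.getD_insert, if_neg hv2,
                    hhv]
                simp only [List.length_append, List.length_cons, List.length_nil]
                push_cast
                omega
          · by_cases hv2 : v = Mval
            · refine ⟨dv ++ [j0], ?_, ?_⟩
              · have hLf : LL.filter (fun i => pvVal a i == v) = j0 :: Mrest := by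
                  rw [hv2]; exact hfM
                have h2f : L2.filter (fun i => pvVal a i == v)
                    = L1.filter (fun i => pvVal a i == v) := by
                  rw [hfilter2 v, if_neg hv1]
                rw [hdv, hLf, h2f, hfilter1 v, if_pos hv2]
                simp
              · rw [PySem.Dict.getD_insert, if_neg hv1, PySem.Dict.getD_insert, if_pos hv2,
                    ← hv2, hhv]
                simp only [List.length_append, List.length_cons, List.length_nil]
                push_cast
                omega
            · refine ⟨dv, ?_, ?_⟩
              · rw [hdv, hfilter2 v, if_neg hv1, hfilter1 v, if_neg hv2]
              · rw [PySem.Dict.getD_insert, if_neg hv1, PySem.Dict.getD_insert, if_neg hv2]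
                exact hhv
        have hlen1 : L1.length + 1 = LL.length := by
          rw [hL1def, hsp1]
          simp [List.length_append]
          omega
        have hlen2 : L2.length + 1 = L1.length := by
          rw [hL2def, hsp2]
          simp [List.length_append]
          omega
        rw [pvStepA fa (LL.map (pvVal a)) ans mval Mval kk mi2 ((s0 :: Ls').map (pvVal a))
              (L1.map (pvVal a)) (L2.map (pvVal a)) (by simp [hLL]) hmin hkk hk3 hslice
              (by simp) hmax hmi2 hrem1 hrem2]
        simp only [bLoop]
        rw [if_neg halive, hm, hp_eq, hMfold2, if_neg hMne, hj_eq, hq_eq]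
        have hcast : ((LL.length : Int)) - 2 = (L2.length : Int) := by omega
        rw [hcast]
        exact ih L2.length (by omega) L2 _ pos _ fa fb _ rfl hpw2 hbnd2 hg2 hpos hhead2
          (by omega) (by omega)


-- ===== VERDICT (by name: the statement is the Claim_ definition above) =====
theorem solution_spec : Claim_equal_solution := by
  intro prices hDom
  unfold Spec_solution
  cases prices with
  | nil => decide
  | cons x xs =>
    have hb := pv_hb (x :: xs) hDom
    have hlen : (PySem.List.pyRange 0 ((x :: xs).length : Int) 1).length = (x :: xs).length := by
      rw [PySem.List.length_pyRange_one]
      simp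
    have hmap : (PySem.List.pyRange 0 ((x :: xs).length : Int) 1).map (pvVal (x :: xs))
        = x :: xs := PySem.List.map_pyGetD_pyRange_zero' (x :: xs) 0
    have hgood0 : pvGood (pvVal (x :: xs))
        (fun i => decide (i ∈ PySem.List.pyRange 0 ((x :: xs).length : Int) 1))
        (bBuild (x :: xs) 0 ((x :: xs).length : Int)) 0 ((x :: xs).length : Int) := by
      refine pvGood_congr _ _ _ _ 0 _ (fun i h1 h2 => ?_) (pvGood_build (x :: xs) 0 _ ?_)
      · exact (decide_eq_true (PySem.List.mem_pyRange_one.mpr ⟨h1, h2⟩)).symm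
      · rw [List.length_cons]; push_cast; omega
    have hsim := pvSim (x :: xs) ((x :: xs).length : Int) rfl hb
      ((PySem.List.pyRange 0 ((x :: xs).length : Int) 1).length)
      (PySem.List.pyRange 0 ((x :: xs).length : Int) 1)
      (bBuild (x :: xs) 0 ((x :: xs).length : Int))
      ((PySem.List.pyRange 0 ((x :: xs).length : Int) 1).foldl
        (fun d i => d.modify (PySem.List.pyGetD (x :: xs) i 0) [] (· ++ [i])) PySem.Dict.empty)
      (((PySem.List.pyRange 0 ((x :: xs).length : Int) 1).foldl
        (fun d i => d.modify (PySem.List.pyGetD (x :: xs) i 0) [] (· ++ [i]))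
          PySem.Dict.empty).keys.foldl (fun h v => h.insert v 0) PySem.Dict.empty)
      ((x :: xs).length + 1) ((x :: xs).length + 1) 0
      rfl
      (PySem.List.pairwise_lt_pyRange_one _ _)
      (fun i hi => PySem.List.mem_pyRange_one.mp hi)
      hgood0
      (fun v => pv_pos_init (x :: xs) ((x :: xs).length : Int) v)
      (fun v => ⟨[], by simp, by simpa using pv_head_init _ PySem.Dict.empty (fun w => by simp) v⟩)
      (by rw [hlen]; omega)
      (by rw [hlen]; omega)
    rw [hmap, hlen] at hsim
    simp only [solution, solution_alt]
    rw [if_neg (by rw [List.length_cons]; push_cast; omega)]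
    exact hsim
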